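-- pv_equiv track=rewrite | github.com/bigfoolliu/liu_aistuff | algorithms/leetcode/easy/171_excel_sheet_column_number.py | excel_sheet_column_number
-- ===== SOURCE A (Python) =====
-- def excel_sheet_column_number(s):
--     """
--     :param s: str
--     :return: int
--     """
--     ret = 0
--     s = s[::-1]
--     counter = 0
--     for i in s:
--         ret += (ord(i) - 64) * (26 ** counter)
--         counter += 1
--     return ret
-- ===== SOURCE B (Python) =====
-- def excel_sheet_column_number(s):
--     ret = 0
--     for c in s:
--         ret = ret * 26 + (ord(c) - 64)
--     return ret
-- ===== Notes on version B (the rewrite author's own statement) =====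
-- stated objective: idiomatic
-- what changed: Left-to-right Horner accumulation (ret = ret*26 + digit) replaces A's string reversal plus a counter and a fresh 26**counter big-power computation at each step.
import Mathlib
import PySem

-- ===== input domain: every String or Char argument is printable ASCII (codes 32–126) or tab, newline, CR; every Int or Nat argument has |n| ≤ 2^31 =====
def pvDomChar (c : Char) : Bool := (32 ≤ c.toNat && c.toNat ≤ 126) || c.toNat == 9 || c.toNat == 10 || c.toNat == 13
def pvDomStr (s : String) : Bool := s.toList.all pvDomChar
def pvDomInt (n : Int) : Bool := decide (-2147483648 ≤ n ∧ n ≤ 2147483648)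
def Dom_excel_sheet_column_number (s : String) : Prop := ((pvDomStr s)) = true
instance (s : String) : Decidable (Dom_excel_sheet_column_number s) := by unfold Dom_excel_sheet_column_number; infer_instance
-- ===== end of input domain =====

-- B replaces A's reverse + counter + 26**counter power computation by a single
-- left-to-right Horner accumulator (ret = ret*26 + (ord(c)-64)); same result, plainer loop.


-- ===== PORT A =====
-- s[::-1] on a string = reverse of its characters; ord(i) = i.toNat; 26 ** counter with
-- counter a nonnegative int, kept as Nat.
def excel_sheet_column_number (s : String) : Int :=
  (((s.toList.reverse).foldl
      (fun (st : Int × Nat) i => (st.1 + ((i.toNat : Int) - 64) * (26 : Int) ^ st.2, st.2 + 1))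
      ((0 : Int), (0 : Nat)))).1

-- ===== PORT B =====
def excel_sheet_column_number_alt (s : String) : Int :=
  s.toList.foldl (fun ret c => ret * 26 + ((c.toNat : Int) - 64)) 0

-- ===== PRECONDITION & SPEC =====
def Spec_excel_sheet_column_number (s : String) (out : Int) : Prop := out = excel_sheet_column_number_alt s
instance (s : String) (out : Int) : Decidable (Spec_excel_sheet_column_number s out) := by unfold Spec_excel_sheet_column_number; infer_instance

-- ===== CLAIM (what is proved, stated in full; the proofs are below) =====
def Claim_equal_excel_sheet_column_number : Prop := ∀ (s : String), Dom_excel_sheet_column_number s → Spec_excel_sheet_column_number s (excel_sheet_column_number s)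

-- ===== LEMMAS AND PROOFS =====

-- digit value of a character
def pvVal (c : Char) : Int := (c.toNat : Int) - 64

-- little-endian polynomial: P [c0,c1,…] = v c0 + 26·v c1 + 26²·…
def pvP : List Char → Int
  | [] => 0
  | c :: m => pvVal c + 26 * pvP m

theorem pvP_append_singleton (m : List Char) (c : Char) :
    pvP (m ++ [c]) = pvP m + (26 : Int) ^ m.length * pvVal c := by
  induction m with
  | nil => simp [pvP]
  | cons c' m ih => simp [pvP, ih, pow_succ]; ring

theorem foldl_A (m : List Char) (ret : Int) (k : Nat) :
    ((m.foldl
      (fun (st : Int × Nat) i => (st.1 + ((i.toNat : Int) - 64) * (26 : Int) ^ st.2, st.2 + 1))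
      (ret, k))).1 = ret + (26 : Int) ^ k * pvP m := by
  induction m generalizing ret k with
  | nil => simp [pvP]
  | cons c m ih => simp [List.foldl, ih, pvP, pvVal, pow_succ]; ring

theorem foldl_B (l : List Char) (r : Int) :
    l.foldl (fun ret c => ret * 26 + ((c.toNat : Int) - 64)) r
      = r * (26 : Int) ^ l.length + pvP l.reverse := by
  induction l generalizing r with
  | nil => simp [pvP]
  | cons c l ih =>
    simp [List.foldl, ih, pvP_append_singleton, pvVal, pow_succ]; ring

-- ===== VERDICT (by name: the statement is the Claim_ definition above) =====
theorem excel_sheet_column_number_spec : Claim_equal_excel_sheet_column_number := by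
  intro s _
  unfold Spec_excel_sheet_column_number excel_sheet_column_number excel_sheet_column_number_alt
  rw [foldl_A, foldl_B]
  simp
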